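-- pv_equiv track=rewrite | github.com/abhinavgkrishnan/adventofcode2025 | day3/#1.py | largestBattery
-- ===== SOURCE A (Python) =====
-- def largestBattery (battery):
--     joltage = 0
--     batteryString = str(battery)
--     digits = [digit for digit in batteryString]
--
--     for i in range (len(digits)):
--         for j in range (i+1,len(digits)):
--             current = int(str(digits[i])+str(digits[j]))
--             joltage = max(joltage,current)
--
--     return joltage;
-- ===== SOURCE B (Python) =====
-- def largestBattery(battery):
--     # One left-to-right pass: pair each digit with the largest digit seen before it.
--     s = str(battery)
--     if s.startswith('-'):
--         s = s[1:]
--     ans = 0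
--     best = -1
--     for ch in s:
--         d = int(ch)
--         if best >= 0:
--             ans = max(ans, 10 * best + d)
--         if d > best:
--             best = d
--     return ans
-- ===== Notes on version B (the rewrite author's own statement) =====
-- stated objective: faster
-- what changed: A scans every ordered pair of digits of str(battery) (nested loops, re-parsing each two-char string with int); B makes one left-to-right pass pairing each digit with the largest digit seen before it.
import Mathlib
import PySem

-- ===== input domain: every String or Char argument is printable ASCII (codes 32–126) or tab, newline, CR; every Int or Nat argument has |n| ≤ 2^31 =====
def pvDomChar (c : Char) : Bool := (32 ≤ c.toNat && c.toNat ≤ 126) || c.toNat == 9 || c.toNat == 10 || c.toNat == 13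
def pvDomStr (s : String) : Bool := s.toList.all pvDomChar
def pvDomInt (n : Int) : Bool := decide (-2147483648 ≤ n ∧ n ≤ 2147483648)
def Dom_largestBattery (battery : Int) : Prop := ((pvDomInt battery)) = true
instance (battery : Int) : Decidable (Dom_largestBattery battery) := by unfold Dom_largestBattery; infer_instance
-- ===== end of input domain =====

-- B replaces A's quadratic scan over all ordered digit pairs by one left-to-right pass
-- that pairs each digit with the largest digit seen before it (objective: faster).

-- ===== PORT A =====
def largestBattery (battery : Int) : Int :=
  let digits := PySem.Int.toChars battery
  (PySem.List.pyRange 0 (PySem.List.len digits)).foldl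
    (fun joltage i =>
      (PySem.List.pyRange (i + 1) (PySem.List.len digits)).foldl
        (fun joltage j =>
          max joltage ((PySem.Int.ofChars? [PySem.List.pyGetD digits i ' ',
                                            PySem.List.pyGetD digits j ' ']).getD 0))
        joltage)
    0

-- ===== PORT B =====
def largestBattery_alt (battery : Int) : Int :=
  let s0 := PySem.Int.toChars battery
  let s := if PySem.Chars.startswith s0 ['-'] then PySem.List.slice s0 (some 1) none else s0
  (s.foldl
    (fun (st : Int × Int) ch =>
      let d := (PySem.Int.ofChars? [ch]).getD 0
      (if st.2 ≥ 0 then max st.1 (10 * st.2 + d) else st.1,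
       if d > st.2 then d else st.2))
    (0, -1)).1

-- ===== PRECONDITION & SPEC =====
def Spec_largestBattery (battery : Int) (out : Int) : Prop := out = largestBattery_alt battery
instance (battery : Int) (out : Int) : Decidable (Spec_largestBattery battery out) := by unfold Spec_largestBattery; infer_instance

-- ===== CLAIM (what is proved, stated in full; the proofs are below) =====
def Claim_equal_largestBattery : Prop := ∀ (battery : Int), Dom_largestBattery battery → Spec_largestBattery battery (largestBattery battery)

-- ===== LEMMAS AND PROOFS =====

/-- Integer value of a decimal digit character. -/
def dv (c : Char) : Int := (c.toNat : Int) - 48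

/-- A's pair recursion: fold the given pair score over all ordered pairs (earlier, later). -/
def apairsF (f : Char → Char → Int) : List Char → Int → Int
  | [], a => a
  | c :: cs, a => apairsF f cs (cs.foldl (fun acc d => max acc (f c d)) a)

/-- B's loop body. -/
def bstep (st : Int × Int) (ch : Char) : Int × Int :=
  let d := (PySem.Int.ofChars? [ch]).getD 0
  (if st.2 ≥ 0 then max st.1 (10 * st.2 + d) else st.1,
   if d > st.2 then d else st.2)

lemma char_toNat_inj {c d : Char} (h : c.toNat = d.toNat) : c = d :=
  Char.ext (UInt32.toNat_inj.mp h)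

lemma digit_eq_or {c : Char} (h : c.isDigit = true) :
    c = '0' ∨ c = '1' ∨ c = '2' ∨ c = '3' ∨ c = '4' ∨ c = '5' ∨ c = '6' ∨ c = '7' ∨ c = '8' ∨ c = '9' := by
  simp only [Char.isDigit, Char.reduceVal, ge_iff_le, Bool.and_eq_true, decide_eq_true_eq,
    UInt32.le_iff_toNat_le] at h
  obtain ⟨h1, h2⟩ := h
  have hb : 48 ≤ c.toNat ∧ c.toNat ≤ 57 := ⟨h1, h2⟩
  rcases (by omega : c.toNat = 48 ∨ c.toNat = 49 ∨ c.toNat = 50 ∨ c.toNat = 51 ∨ c.toNat = 52 ∨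
      c.toNat = 53 ∨ c.toNat = 54 ∨ c.toNat = 55 ∨ c.toNat = 56 ∨ c.toNat = 57) with
    h|h|h|h|h|h|h|h|h|h
  · exact Or.inl (char_toNat_inj (h.trans rfl))
  · exact Or.inr (Or.inl (char_toNat_inj (h.trans rfl)))
  · exact Or.inr (Or.inr (Or.inl (char_toNat_inj (h.trans rfl))))
  · exact Or.inr (Or.inr (Or.inr (Or.inl (char_toNat_inj (h.trans rfl)))))
  · exact Or.inr (Or.inr (Or.inr (Or.inr (Or.inl (char_toNat_inj (h.trans rfl))))))
  · exact Or.inr (Or.inr (Or.inr (Or.inr (Or.inr (Or.inl (char_toNat_inj (h.trans rfl)))))))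
  · exact Or.inr (Or.inr (Or.inr (Or.inr (Or.inr (Or.inr (Or.inl (char_toNat_inj (h.trans rfl))))))))
  · exact Or.inr (Or.inr (Or.inr (Or.inr (Or.inr (Or.inr (Or.inr (Or.inl (char_toNat_inj (h.trans rfl)))))))))
  · exact Or.inr (Or.inr (Or.inr (Or.inr (Or.inr (Or.inr (Or.inr (Or.inr (Or.inl (char_toNat_inj (h.trans rfl))))))))))
  · exact Or.inr (Or.inr (Or.inr (Or.inr (Or.inr (Or.inr (Or.inr (Or.inr (Or.inr (char_toNat_inj (h.trans rfl))))))))))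

lemma dv_nonneg {c : Char} (h : c.isDigit = true) : 0 ≤ dv c := by
  rcases digit_eq_or h with rfl|rfl|rfl|rfl|rfl|rfl|rfl|rfl|rfl|rfl <;> decide

lemma ofChars?_pair {c d : Char} (hc : c.isDigit = true) (hd : d.isDigit = true) :
    PySem.Int.ofChars? [c, d] = some (10 * dv c + dv d) := by
  rcases digit_eq_or hc with rfl|rfl|rfl|rfl|rfl|rfl|rfl|rfl|rfl|rfl <;>
    rcases digit_eq_or hd with rfl|rfl|rfl|rfl|rfl|rfl|rfl|rfl|rfl|rfl <;> decide

lemma ofChars?_single {c : Char} (hc : c.isDigit = true) :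
    PySem.Int.ofChars? [c] = some (dv c) := by
  rcases digit_eq_or hc with rfl|rfl|rfl|rfl|rfl|rfl|rfl|rfl|rfl|rfl <;> decide

lemma ofChars?_negpair {d : Char} (hd : d.isDigit = true) :
    PySem.Int.ofChars? ['-', d] = some (-(dv d)) := by
  rcases digit_eq_or hd with rfl|rfl|rfl|rfl|rfl|rfl|rfl|rfl|rfl|rfl <;> decide

/-- Pull a max out of a max-fold. -/
lemma foldl_max_pull (l : List Char) (f : Char → Int) : ∀ (X y : Int),
    l.foldl (fun a d => max a (f d)) (max X y) = max (l.foldl (fun a d => max a (f d)) X) y := by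
  induction l with
  | nil => intro X y; rfl
  | cons c cs ih =>
    intro X y
    simp only [List.foldl_cons]
    rw [show max (max X y) (f c) = max (max X (f c)) y by omega, ih]

/-- Folding max of a pointwise max splits into two successive folds. -/
lemma foldl_max_split (l : List Char) (f g : Char → Int) : ∀ (X : Int),
    l.foldl (fun a d => max a (max (f d) (g d))) X
      = l.foldl (fun a d => max a (g d)) (l.foldl (fun a d => max a (f d)) X) := by
  induction l with
  | nil => intro X; rfl
  | cons c cs ih =>
    intro X
    simp only [List.foldl_cons]
    rw [show max X (max (f c) (g c)) = max (max X (f c)) (g c) by omega, ih,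
      foldl_max_pull, foldl_max_pull, foldl_max_pull]

lemma apairsF_congr (f g : Char → Char → Int) : ∀ (ds : List Char) (a : Int),
    (∀ c ∈ ds, ∀ d ∈ ds, f c d = g c d) → apairsF f ds a = apairsF g ds a := by
  intro ds
  induction ds with
  | nil => intro a _; rfl
  | cons c cs ih =>
    intro a h
    simp only [apairsF]
    rw [PySem.List.foldl_congr_mem cs _ (fun acc d => max acc (g c d)) a
      (fun acc x hx => by rw [h c List.mem_cons_self x (List.mem_cons_of_mem _ hx)])]
    exact ih _ (fun x hx y hy => h x (List.mem_cons_of_mem _ hx) y (List.mem_cons_of_mem _ hy))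

lemma pyGetD_cons_succ {α : Type} (c : α) (cs : List α) (k : Nat) (d : α) :
    PySem.List.pyGetD (c :: cs) ((k : Int) + 1) d = PySem.List.pyGetD cs (k : Int) d := by
  rw [show ((k : Int) + 1) = (((k + 1 : Nat) : Int)) by push_cast; ring,
    PySem.List.pyGetD_natCast, PySem.List.pyGetD_natCast]
  rfl

/-- A's index loops compute the pair recursion. -/
lemma rangefold (ds : List Char) : ∀ (a : Int),
    (List.range ds.length).foldl
      (fun j k => ((ds.drop (k+1)).foldl
        (fun acc d => max acc ((PySem.Int.ofChars? [PySem.List.pyGetD ds (k : Int) ' ', d]).getD 0)) j)) a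
    = apairsF (fun c d => (PySem.Int.ofChars? [c, d]).getD 0) ds a := by
  induction ds with
  | nil => intro a; rfl
  | cons c cs ih =>
    intro a
    rw [List.length_cons, List.range_succ_eq_map, List.foldl_cons, List.foldl_map]
    simp only [List.drop_succ_cons, List.drop_zero, Nat.succ_eq_add_one]
    rw [show (fun (j : Int) (k : Nat) => ((cs.drop (k+1)).foldl
          (fun acc d => max acc ((PySem.Int.ofChars? [PySem.List.pyGetD (c :: cs) (((k+1 : Nat) : Int)) ' ', d]).getD 0)) j))
        = (fun (j : Int) (k : Nat) => ((cs.drop (k+1)).foldl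
          (fun acc d => max acc ((PySem.Int.ofChars? [PySem.List.pyGetD cs (k : Int) ' ', d]).getD 0)) j)) by
      funext j k
      rw [show (((k+1 : Nat)) : Int) = (k : Int) + 1 by push_cast; ring, pyGetD_cons_succ]]
    rw [ih]
    simp [apairsF]

/-- Pairs whose tens digit is '-' never raise the accumulator above a nonnegative start. -/
lemma neg_fold (ds : List Char) : ∀ (a : Int), (∀ c ∈ ds, c.isDigit = true) → 0 ≤ a →
    ds.foldl (fun acc d => max acc ((PySem.Int.ofChars? ['-', d]).getD 0)) a = a := by
  induction ds with
  | nil => intro a _ _; rfl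
  | cons c cs ih =>
    intro a h ha
    simp only [List.foldl_cons]
    rw [ofChars?_negpair (h c List.mem_cons_self)]
    have := dv_nonneg (h c List.mem_cons_self)
    rw [show max a (Option.getD (some (-(dv c))) 0) = a by simp; omega]
    exact ih a (fun x hx => h x (List.mem_cons_of_mem _ hx)) ha

/-- B's scan with current best `b ≥ 0` equals the pair recursion after folding in b's pairs. -/
lemma mixed_eq (cs : List Char) : ∀ (a b : Int), (∀ c ∈ cs, c.isDigit = true) → 0 ≤ b →
    (cs.foldl bstep (a, b)).1
      = apairsF (fun c d => 10 * dv c + dv d) cs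
          (cs.foldl (fun acc d => max acc (10 * b + dv d)) a) := by
  induction cs with
  | nil => intro a b _ _; rfl
  | cons c cs ih =>
    intro a b h hb
    have hc := h c List.mem_cons_self
    have hcv := dv_nonneg hc
    simp only [List.foldl_cons, bstep, ofChars?_single hc, Option.getD_some]
    rw [show (if b ≥ 0 then max a (10 * b + dv c) else a) = max a (10 * b + dv c) by
      rw [if_pos hb]]
    rw [show (if dv c > b then dv c else b) = max b (dv c) by split_ifs <;> omega]
    rw [ih _ _ (fun x hx => h x (List.mem_cons_of_mem _ hx)) (by omega)]
    simp only [apairsF]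
    rw [show (fun (acc : Int) (d : Char) => max acc (10 * max b (dv c) + dv d))
        = (fun (acc : Int) (d : Char) => max acc (max (10 * b + dv d) (10 * dv c + dv d))) by
      funext acc d; congr 1; omega]
    rw [foldl_max_split]

/-- B's whole scan equals the pair recursion from 0. -/
lemma alt_char (ds : List Char) (h : ∀ c ∈ ds, c.isDigit = true) :
    (ds.foldl bstep (0, -1)).1 = apairsF (fun c d => 10 * dv c + dv d) ds 0 := by
  cases ds with
  | nil => rfl
  | cons c cs =>
    have hc := h c List.mem_cons_self
    have hcv := dv_nonneg hc
    simp only [List.foldl_cons, bstep, ofChars?_single hc, Option.getD_some]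
    rw [show (if (-1 : Int) ≥ 0 then max 0 (10 * (-1) + dv c) else (0:Int)) = 0 by norm_num]
    rw [show (if dv c > (-1:Int) then dv c else (-1:Int)) = dv c by rw [if_pos (by omega)]]
    rw [mixed_eq cs 0 (dv c) (fun x hx => h x (List.mem_cons_of_mem _ hx)) hcv]
    rfl

/-- A's port computes the pair recursion over the character list. -/
lemma a_char (battery : Int) :
    largestBattery battery
      = apairsF (fun c d => (PySem.Int.ofChars? [c, d]).getD 0) (PySem.Int.toChars battery) 0 := by
  unfold largestBattery
  set ds := PySem.Int.toChars battery with hds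
  rw [PySem.List.foldl_congr_mem _ _
    (fun (j : Int) (i : Int) => ((ds.drop (i+1).toNat).foldl
      (fun acc d => max acc ((PySem.Int.ofChars? [PySem.List.pyGetD ds i ' ', d]).getD 0)) j)) 0
    (fun acc i hi => by
      have h0 : (0:Int) ≤ i + 1 := by
        have := (PySem.List.mem_pyRange_one.mp hi).1; omega
      simpa using PySem.List.foldl_pyRange_pyGetD ds ' '
        (fun a d => max a ((PySem.Int.ofChars? [PySem.List.pyGetD ds i ' ', d]).getD 0)) acc h0)]
  rw [show PySem.List.len ds = ((ds.length : Nat) : Int) from rfl, PySem.List.pyRange_zero_natCast,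
    List.foldl_map]
  rw [show (fun (j : Int) (k : Nat) => ((ds.drop ((k:Int)+1).toNat).foldl
        (fun acc d => max acc ((PySem.Int.ofChars? [PySem.List.pyGetD ds (k:Int) ' ', d]).getD 0)) j))
      = (fun (j : Int) (k : Nat) => ((ds.drop (k+1)).foldl
        (fun acc d => max acc ((PySem.Int.ofChars? [PySem.List.pyGetD ds (k:Int) ' ', d]).getD 0)) j)) by
    funext j k
    rw [show ((k:Int)+1).toNat = k + 1 by omega]]
  exact rangefold ds 0

lemma digits_toDigits (m : Nat) : ∀ c ∈ Nat.toDigits 10 m, c.isDigit = true :=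
  fun _ hc => Nat.isDigit_of_mem_toDigits (by norm_num) (by norm_num) hc

lemma startswith_digits (c : Char) (cs : List Char) (hc : c.isDigit = true) :
    PySem.Chars.startswith (c :: cs) ['-'] = false := by
  rcases digit_eq_or hc with rfl|rfl|rfl|rfl|rfl|rfl|rfl|rfl|rfl|rfl <;>
    simp [PySem.Chars.startswith, List.isPrefixOf]

/-- Common core: A and B agree on any all-digit character list. -/
lemma core_eq (dds : List Char) (h : ∀ c ∈ dds, c.isDigit = true) :
    apairsF (fun c d => (PySem.Int.ofChars? [c, d]).getD 0) dds 0
      = (dds.foldl bstep (0, -1)).1 := by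
  rw [alt_char dds h]
  exact apairsF_congr _ _ dds 0
    (fun c hc d hd => by rw [ofChars?_pair (h c hc) (h d hd)]; rfl)

-- ===== VERDICT (by name: the statement is the Claim_ definition above) =====
theorem largestBattery_spec : Claim_equal_largestBattery := by
  intro battery _
  unfold Spec_largestBattery
  rw [a_char]
  by_cases hneg : battery < 0
  · have hds : PySem.Int.toChars battery = '-' :: Nat.toDigits 10 battery.natAbs := by
      simp [PySem.Int.toChars, hneg]
    have hdig := digits_toDigits battery.natAbs
    show _ = largestBattery_alt battery
    unfold largestBattery_alt
    rw [hds]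
    dsimp only
    simp only [apairsF]
    rw [neg_fold _ 0 hdig le_rfl]
    rw [show PySem.Chars.startswith ('-' :: Nat.toDigits 10 battery.natAbs) ['-'] = true by
      simp [PySem.Chars.startswith, List.isPrefixOf]]
    simp only [if_true, PySem.List.slice_from_one, List.tail_cons]
    exact core_eq _ hdig
  · have hds : PySem.Int.toChars battery = Nat.toDigits 10 battery.toNat := by
      simp [PySem.Int.toChars, hneg]
    have hdig := digits_toDigits battery.toNat
    show _ = largestBattery_alt battery
    unfold largestBattery_alt
    rw [hds]
    obtain ⟨c, cs, hcons⟩ : ∃ c cs, Nat.toDigits 10 battery.toNat = c :: cs := by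
      cases hh : Nat.toDigits 10 battery.toNat with
      | nil => exact absurd (hh ▸ @Nat.length_toDigits_pos 10 battery.toNat) (by simp)
      | cons c cs => exact ⟨c, cs, rfl⟩
    rw [hcons]
    dsimp only
    rw [startswith_digits c cs (hdig c (hcons ▸ List.mem_cons_self))]
    simp only [Bool.false_eq_true, if_false]
    exact core_eq _ (fun x hx => hdig x (hcons ▸ hx))
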